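-- pv_equiv track=rewrite | github.com/pablogventura/algoritmos3 | algoritmos/coloreo/heuristicas.py | v_coloresvecinos
-- ===== SOURCE A (Python) =====
-- def v_coloresvecinos(grafo,coloreo):
--     """
--     Devuelve una lista de vertices no coloreados con mas colores vecinos.
--     """
--     result = {}
--     for v in grafo.keys():
--         result[v] = []
--         for w in grafo[v]:
--             if w in coloreo.keys():
--                 result[v].append(coloreo[w])
--         result[v] = len(set(result[v]))
--     for v in coloreo.keys():
--         if v in result.keys():
--             del result[v]
--     return list(filter(lambda x: result[x] == max(result.values()), result.keys()))
-- ===== SOURCE B (Python) =====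
-- def v_coloresvecinos(grafo, coloreo):
--     """
--     Devuelve una lista de vertices no coloreados con mas colores vecinos.
--     """
--     best = -1
--     winners = []
--     for v in grafo:
--         if v in coloreo:
--             continue
--         cnt = len({coloreo[w] for w in grafo[v] if w in coloreo})
--         if cnt > best:
--             best = cnt
--             winners = [v]
--         elif cnt == best:
--             winners.append(v)
--     return winners
-- ===== Notes on version B (the rewrite author's own statement) =====
-- stated objective: faster
-- what changed: Replaces A's three-phase pipeline (build a count table for all vertices, delete the colored ones, then filter by a max that is recomputed inside the filter lambda for every key) with a single streaming pass over the graph that skips colored vertices and maintains a running best count and winner list.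
import Mathlib
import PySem

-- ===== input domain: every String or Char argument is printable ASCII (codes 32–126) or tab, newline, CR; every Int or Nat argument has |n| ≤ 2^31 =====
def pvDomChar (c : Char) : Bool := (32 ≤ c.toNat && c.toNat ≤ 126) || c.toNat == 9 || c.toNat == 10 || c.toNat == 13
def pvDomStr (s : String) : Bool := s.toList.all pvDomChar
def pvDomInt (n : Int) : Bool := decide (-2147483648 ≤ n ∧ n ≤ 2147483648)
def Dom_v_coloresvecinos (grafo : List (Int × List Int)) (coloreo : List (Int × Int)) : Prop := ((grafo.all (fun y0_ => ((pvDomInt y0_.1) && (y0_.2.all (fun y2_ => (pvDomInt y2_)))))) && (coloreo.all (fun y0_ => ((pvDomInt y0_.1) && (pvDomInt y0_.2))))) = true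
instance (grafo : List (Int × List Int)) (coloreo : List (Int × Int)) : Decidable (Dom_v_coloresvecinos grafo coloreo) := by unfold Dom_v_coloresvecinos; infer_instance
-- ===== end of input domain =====

-- B replaces A's table-build / delete / filter-by-recomputed-max pipeline with one streaming
-- pass keeping a running best count and winner list (objective: faster).


-- ===== PORT A =====
-- result = {}; for v in grafo.keys(): collect coloreo[w] for colored neighbours w, store len(set(...));
-- then delete every colored v; return keys whose value == max(result.values()) (the max sits inside the
-- filter lambda, so on an empty table the filter simply yields []).
def v_coloresvecinos (grafo : List (Int × List Int)) (coloreo : List (Int × Int)) : List Int :=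
  let g : PySem.Dict Int (List Int) := PySem.Dict.ofList grafo
  let c : PySem.Dict Int Int := PySem.Dict.ofList coloreo
  let result : PySem.Dict Int Int :=
    g.keys.foldl (fun r v =>
      let colors : List Int := (g.getD v []).foldl
        (fun acc w => if c.keys.contains w then acc ++ [c.getD w 0] else acc) []
      r.insert v ((PySem.Set.ofList colors).length : Int)) PySem.Dict.empty
  let result2 : PySem.Dict Int Int :=
    c.keys.foldl (fun r v => if r.keys.contains v then r.erase v else r) result
  result2.keys.filter (fun x =>
    result2.getD x 0 == (PySem.List.max? result2.values (fun y => y)).getD 0)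

-- ===== PORT B =====
-- one pass over grafo's keys: skip colored vertices, count distinct neighbour colors with a set,
-- keep (best, winners); reset winners on a strictly larger count, append on a tie.
def v_coloresvecinos_alt (grafo : List (Int × List Int)) (coloreo : List (Int × Int)) : List Int :=
  let g : PySem.Dict Int (List Int) := PySem.Dict.ofList grafo
  let c : PySem.Dict Int Int := PySem.Dict.ofList coloreo
  (g.keys.foldl (fun (st : Int × List Int) v =>
      if c.contains v then st
      else
        let cnt : Int := ((g.getD v []).foldl
          (fun s w => if c.contains w then PySem.Set.add s (c.getD w 0) else s)
          (PySem.Set.empty : PySem.Set Int)).length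
        if cnt > st.1 then (cnt, [v])
        else if cnt == st.1 then (st.1, st.2 ++ [v])
        else st)
    ((-1 : Int), ([] : List Int))).2

-- ===== PRECONDITION & SPEC =====
def Spec_v_coloresvecinos (grafo : List (Int × List Int)) (coloreo : List (Int × Int)) (out : List Int) : Prop := out = v_coloresvecinos_alt grafo coloreo
instance (grafo : List (Int × List Int)) (coloreo : List (Int × Int)) (out : List Int) : Decidable (Spec_v_coloresvecinos grafo coloreo out) := by unfold Spec_v_coloresvecinos; infer_instance

-- ===== CLAIM (what is proved, stated in full; the proofs are below) =====
def Claim_equal_v_coloresvecinos : Prop := ∀ (grafo : List (Int × List Int)) (coloreo : List (Int × Int)), Dom_v_coloresvecinos grafo coloreo → Spec_v_coloresvecinos grafo coloreo (v_coloresvecinos grafo coloreo)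

-- ===== LEMMAS AND PROOFS =====

-- the distinct-neighbour-colour count both programs compute for a vertex v
def pvN (g : PySem.Dict Int (List Int)) (c : PySem.Dict Int Int) (v : Int) : Int :=
  ((PySem.Set.ofList (((g.getD v []).filter (fun w => c.keys.contains w)).map
      (fun w => c.getD w 0))).length : Int)

theorem pv_contains_keys (c : PySem.Dict Int Int) (k : Int) :
    c.contains k = c.keys.contains k := by
  simp only [PySem.Dict.contains_eq_decide_mem_keys]
  cases hb : c.keys.contains k
  · simp at hb ⊢; exact hb
  · simp [List.contains_iff_mem.mp hb]

-- A's colour-collecting loop produces the filtered-mapped list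
theorem pv_colorsA (g : PySem.Dict Int (List Int)) (c : PySem.Dict Int Int) (v : Int) :
    (g.getD v []).foldl (fun acc w => if c.keys.contains w then acc ++ [c.getD w 0] else acc) [] =
      ((g.getD v []).filter (fun w => c.keys.contains w)).map (fun w => c.getD w 0) := by
  simpa using PySem.List.foldl_append_if (fun w => c.keys.contains w) (fun w => c.getD w 0)
    (g.getD v []) []

-- B's set-building loop produces the same set
theorem pv_colorsB (g : PySem.Dict Int (List Int)) (c : PySem.Dict Int Int) (v : Int) :
    ((g.getD v []).foldl
        (fun s w => if c.contains w then PySem.Set.add s (c.getD w 0) else s)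
        (PySem.Set.empty : PySem.Set Int)) =
      PySem.Set.ofList (((g.getD v []).filter (fun w => c.keys.contains w)).map
        (fun w => c.getD w 0)) := by
  have h1 : (g.getD v []).foldl (fun s w => if c.contains w then PySem.Set.add s (c.getD w 0) else s)
        (PySem.Set.empty : PySem.Set Int) =
      ((g.getD v []).filter (fun w => c.keys.contains w)).foldl
        (fun s w => PySem.Set.add s (c.getD w 0)) (PySem.Set.empty : PySem.Set Int) := by
    rw [List.foldl_filter]
    simp only [pv_contains_keys]
  rw [h1, ← PySem.Set.update_map_eq_foldl_add, PySem.Set.update_empty]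

-- the deletion loop is a filter on the items
theorem pv_erase_loop (cs : List Int) (d : PySem.Dict Int Int) :
    cs.foldl (fun r v => if r.keys.contains v then r.erase v else r) d =
      PySem.Dict.mk (d.items.filter (fun p => !cs.contains p.1)) := by
  induction cs generalizing d with
  | nil => apply PySem.Dict.ext; simp
  | cons v cs ih =>
    simp only [List.foldl_cons]
    have hstep : (if d.keys.contains v then d.erase v else d) =
        PySem.Dict.mk (d.items.filter (fun p => !(p.1 == v))) := by
      split_ifs with h
      · rfl
      · apply PySem.Dict.ext
        symm
        rw [List.filter_eq_self]
        intro p hp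
        have hk : p.1 ∈ d.keys := List.mem_map_of_mem hp
        have : p.1 ≠ v := by
          intro he; exact h (List.contains_iff_mem.mpr (he ▸ hk))
        simpa using this
    rw [hstep, ih]
    apply PySem.Dict.ext
    simp only [List.filter_filter]
    apply List.filter_congr
    intro p _
    by_cases hpv : p.1 = v <;> simp [hpv, Bool.and_comm]

-- max-fold helpers
theorem pv_le_foldl_maxN (g : PySem.Dict Int (List Int)) (c : PySem.Dict Int Int)
    (t : List Int) (b : Int) :
    b ≤ t.foldl (fun m x => max m (pvN g c x)) b := by
  induction t generalizing b with
  | nil => simp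
  | cons y t ih =>
    simp only [List.foldl_cons]
    exact le_trans (le_max_left _ _) (ih (max b (pvN g c y)))

theorem pv_mem_le_foldl_maxN (g : PySem.Dict Int (List Int)) (c : PySem.Dict Int Int)
    (t : List Int) (b : Int) (x : Int) (hx : x ∈ t) :
    pvN g c x ≤ t.foldl (fun m y => max m (pvN g c y)) b := by
  induction t generalizing b with
  | nil => cases hx
  | cons y t ih =>
    simp only [List.foldl_cons]
    rcases List.mem_cons.mp hx with h | h
    · exact le_trans (h ▸ le_max_right b (pvN g c y)) (pv_le_foldl_maxN g c t _)
    · exact ih _ h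

theorem pv_foldl_maxN_of_le (g : PySem.Dict Int (List Int)) (c : PySem.Dict Int Int)
    (t : List Int) (b : Int) (h : ∀ x ∈ t, pvN g c x ≤ b) :
    t.foldl (fun m x => max m (pvN g c x)) b = b := by
  induction t generalizing b with
  | nil => rfl
  | cons y t ih =>
    simp only [List.foldl_cons]
    rw [max_eq_left (h y (List.mem_cons_self))]
    exact ih _ (fun x hx => h x (List.mem_cons_of_mem _ hx))

-- the streaming argmax fold, characterised
theorem pv_stream (g : PySem.Dict Int (List Int)) (c : PySem.Dict Int Int)
    (l : List Int) (b : Int) (w : List Int) :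
    l.foldl (fun (st : Int × List Int) v =>
        if pvN g c v > st.1 then (pvN g c v, [v])
        else if pvN g c v == st.1 then (st.1, st.2 ++ [v])
        else st) (b, w) =
      (l.foldl (fun m x => max m (pvN g c x)) b,
       (if ∀ x ∈ l, pvN g c x ≤ b then w else []) ++
         l.filter (fun x => pvN g c x == l.foldl (fun m y => max m (pvN g c y)) b)) := by
  induction l generalizing b w with
  | nil => simp
  | cons v t ih =>
    simp only [List.foldl_cons, List.filter_cons, List.forall_mem_cons]
    rcases lt_trichotomy b (pvN g c v) with h1 | h2 | h3
    · rw [if_pos (show pvN g c v > (b, w).1 from h1)]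
      rw [ih (pvN g c v) [v]]
      rw [show max b (pvN g c v) = pvN g c v from max_eq_right (le_of_lt h1)]
      rw [if_neg (show ¬ (pvN g c v ≤ b ∧ ∀ x ∈ t, pvN g c x ≤ b) from
        fun hc => absurd hc.1 (not_le.mpr h1))]
      by_cases hall : ∀ x ∈ t, pvN g c x ≤ pvN g c v
      · have hM : t.foldl (fun m y => max m (pvN g c y)) (pvN g c v) = pvN g c v :=
          pv_foldl_maxN_of_le g c t _ hall
        rw [if_pos hall, hM]
        simp
      · have hne : ¬ (pvN g c v == t.foldl (fun m y => max m (pvN g c y)) (pvN g c v)) = true := by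
          push Not at hall
          obtain ⟨x, hx, hlt⟩ := hall
          have h2 := pv_mem_le_foldl_maxN g c t (pvN g c v) x hx
          simp only [beq_iff_eq]
          intro he
          rw [← he] at h2
          exact absurd h2 (not_le.mpr hlt)
        rw [if_neg hall, if_neg hne]
    · rw [if_neg (show ¬ pvN g c v > (b, w).1 from by simp [← h2])]
      rw [if_pos (show (pvN g c v == (b, w).1) = true from by simp [← h2])]
      rw [ih b (w ++ [v])]
      rw [show max b (pvN g c v) = b from max_eq_left (le_of_eq h2.symm)]
      by_cases hall : ∀ x ∈ t, pvN g c x ≤ b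
      · have hM : t.foldl (fun m y => max m (pvN g c y)) b = b :=
          pv_foldl_maxN_of_le g c t _ hall
        rw [if_pos hall, hM]
        rw [if_pos (show (pvN g c v ≤ b ∧ ∀ x ∈ t, pvN g c x ≤ b) from ⟨le_of_eq h2.symm, hall⟩)]
        rw [if_pos (show (pvN g c v == b) = true from by simp [← h2])]
        simp
      · have hne : ¬ (pvN g c v == t.foldl (fun m y => max m (pvN g c y)) b) = true := by
          push Not at hall
          obtain ⟨x, hx, hlt⟩ := hall
          have hle := pv_mem_le_foldl_maxN g c t b x hx
          simp only [beq_iff_eq]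
          intro he
          rw [← he, ← h2] at hle
          exact absurd hle (not_le.mpr hlt)
        rw [if_neg hall, if_neg hne,
          if_neg (show ¬ (pvN g c v ≤ b ∧ ∀ x ∈ t, pvN g c x ≤ b) from fun hc => hall hc.2)]
    · rw [if_neg (show ¬ pvN g c v > (b, w).1 from not_lt.mpr (le_of_lt h3))]
      rw [if_neg (show ¬ (pvN g c v == (b, w).1) = true from by
        simp only [beq_iff_eq]; exact ne_of_lt h3)]
      rw [ih b w]
      rw [show max b (pvN g c v) = b from max_eq_left (le_of_lt h3)]
      have hne : ¬ (pvN g c v == t.foldl (fun m y => max m (pvN g c y)) b) = true := by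
        have hle := pv_le_foldl_maxN g c t b
        simp only [beq_iff_eq]
        intro he
        rw [← he] at hle
        exact absurd hle (not_le.mpr h3)
      rw [if_neg hne]
      by_cases hall : ∀ x ∈ t, pvN g c x ≤ b
      · rw [if_pos hall,
          if_pos (show (pvN g c v ≤ b ∧ ∀ x ∈ t, pvN g c x ≤ b) from ⟨le_of_lt h3, hall⟩)]
      · rw [if_neg hall,
          if_neg (show ¬ (pvN g c v ≤ b ∧ ∀ x ∈ t, pvN g c x ≤ b) from fun hc => hall hc.2)]

-- ===== VERDICT (by name: the statement is the Claim_ definition above) =====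
theorem pvN_nonneg (g : PySem.Dict Int (List Int)) (c : PySem.Dict Int Int) (v : Int) :
    0 ≤ pvN g c v := Int.natCast_nonneg _

theorem pv_filter_max (g : PySem.Dict Int (List Int)) (c : PySem.Dict Int Int) (U : List Int) :
    U.filter (fun x => pvN g c x == (PySem.List.max? (U.map (pvN g c)) (fun y => y)).getD 0) =
      U.filter (fun x => pvN g c x == U.foldl (fun m y => max m (pvN g c y)) (-1)) := by
  cases U with
  | nil => rfl
  | cons u t =>
    rw [List.map_cons, PySem.List.max?_id_cons, List.foldl_map, List.foldl_cons]
    rw [show max (-1 : Int) (pvN g c u) = pvN g c u from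
      max_eq_right (le_trans (by norm_num) (pvN_nonneg g c u))]
    simp only [Option.getD_some]

theorem v_coloresvecinos_spec : Claim_equal_v_coloresvecinos := by
  intro grafo coloreo _
  unfold Spec_v_coloresvecinos v_coloresvecinos v_coloresvecinos_alt
  set g := PySem.Dict.ofList grafo with hg
  set c := PySem.Dict.ofList coloreo with hc
  -- A's build loop: a table over g.keys with value pvN
  have hf : (fun (r : PySem.Dict Int Int) v => r.insert v
        ((PySem.Set.ofList ((g.getD v []).foldl
          (fun acc w => if c.keys.contains w then acc ++ [c.getD w 0] else acc) [])).length : Int)) =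
      fun r v => r.insert v (pvN g c v) := by
    funext r v
    rw [pv_colorsA]
    rfl
  have hAitems : (g.keys.foldl (fun r v => r.insert v
        ((PySem.Set.ofList ((g.getD v []).foldl
          (fun acc w => if c.keys.contains w then acc ++ [c.getD w 0] else acc) [])).length : Int))
        PySem.Dict.empty).items = g.keys.map (fun v => (v, pvN g c v)) := by
    rw [hf]
    have h := PySem.Dict.items_foldl_insert_fresh (κ := Int) (ν := Int) g.keys (fun v => v)
      (fun v => pvN g c v) PySem.Dict.empty (fun a _ => PySem.Dict.contains_empty a)
      (by rw [show List.map (fun v : Int => v) g.keys = g.keys from List.map_id g.keys]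
          exact PySem.Dict.nodup_keys_ofList grafo)
    simpa using h
  have hUnodup : (g.keys.filter (fun v => !c.keys.contains v)).Nodup :=
    (PySem.Dict.nodup_keys_ofList grafo).filter _
  -- A's deletion loop: keep exactly the uncolored keys
  have hR2 : c.keys.foldl (fun r v => if r.keys.contains v then r.erase v else r)
        (g.keys.foldl (fun r v => r.insert v
          ((PySem.Set.ofList ((g.getD v []).foldl
            (fun acc w => if c.keys.contains w then acc ++ [c.getD w 0] else acc) [])).length : Int))
          PySem.Dict.empty) =
      PySem.Dict.mk ((g.keys.filter (fun v => !c.keys.contains v)).map (fun v => (v, pvN g c v))) := by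
    rw [pv_erase_loop]
    apply PySem.Dict.ext
    rw [hAitems, List.filter_map]
    simp [Function.comp_def]
  simp only [hR2]
  -- B's skip-guarded fold over g.keys is the plain fold over the uncolored keys
  have hBfun : (fun (st : Int × List Int) v =>
        if c.contains v then st
        else
          if ((((g.getD v []).foldl
              (fun s w => if c.contains w then PySem.Set.add s (c.getD w 0) else s)
              (PySem.Set.empty : PySem.Set Int)).length : Int)) > st.1 then
            ((((g.getD v []).foldl
              (fun s w => if c.contains w then PySem.Set.add s (c.getD w 0) else s)
              (PySem.Set.empty : PySem.Set Int)).length : Int), [v])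
          else if ((((g.getD v []).foldl
              (fun s w => if c.contains w then PySem.Set.add s (c.getD w 0) else s)
              (PySem.Set.empty : PySem.Set Int)).length : Int)) == st.1 then (st.1, st.2 ++ [v])
          else st) =
      fun st v =>
        if c.keys.contains v then st
        else
          if pvN g c v > st.1 then (pvN g c v, [v])
          else if pvN g c v == st.1 then (st.1, st.2 ++ [v])
          else st := by
    funext st v
    rw [pv_contains_keys, pv_colorsB]
    rfl
  simp only [hBfun]
  have hBfold : g.keys.foldl (fun (st : Int × List Int) v =>
        if c.keys.contains v then st
        else
          if pvN g c v > st.1 then (pvN g c v, [v])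
          else if pvN g c v == st.1 then (st.1, st.2 ++ [v])
          else st) ((-1 : Int), ([] : List Int)) =
      (g.keys.filter (fun v => !c.keys.contains v)).foldl (fun (st : Int × List Int) v =>
          if pvN g c v > st.1 then (pvN g c v, [v])
          else if pvN g c v == st.1 then (st.1, st.2 ++ [v])
          else st) ((-1 : Int), ([] : List Int)) := by
    rw [List.foldl_filter]
    congr 1
    funext st v
    cases hcv : c.keys.contains v
    · rfl
    · rfl
  rw [hBfold, pv_stream, ite_self, List.nil_append]
  -- A's filter over the remaining keys
  have hkeys : (PySem.Dict.mk ((g.keys.filter (fun v => !c.keys.contains v)).map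
      (fun v => (v, pvN g c v)))).keys = g.keys.filter (fun v => !c.keys.contains v) := by
    show ((g.keys.filter (fun v => !c.keys.contains v)).map (fun v => (v, pvN g c v))).map
        (fun x => x.1) = _
    rw [List.map_map,
      show ((fun x : Int × Int => x.1) ∘ fun v : Int => (v, pvN g c v)) = id from rfl,
      List.map_id]
  have hvals : (PySem.Dict.mk ((g.keys.filter (fun v => !c.keys.contains v)).map
      (fun v => (v, pvN g c v)))).values = (g.keys.filter (fun v => !c.keys.contains v)).map (pvN g c) := by
    show ((g.keys.filter (fun v => !c.keys.contains v)).map (fun v => (v, pvN g c v))).map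
        (fun x => x.2) = _
    rw [List.map_map]
    rfl
  rw [hkeys, hvals]
  have hpred : ∀ x ∈ g.keys.filter (fun v => !c.keys.contains v),
      ((PySem.Dict.mk ((g.keys.filter (fun v => !c.keys.contains v)).map
          (fun v => (v, pvN g c v)))).getD x 0 ==
        (PySem.List.max? ((g.keys.filter (fun v => !c.keys.contains v)).map (pvN g c))
          (fun y => y)).getD 0) =
      (pvN g c x ==
        (PySem.List.max? ((g.keys.filter (fun v => !c.keys.contains v)).map (pvN g c))
          (fun y => y)).getD 0) := by
    intro x hx
    rw [PySem.Dict.getD_of_mem_items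
      (PySem.Dict.mk ((g.keys.filter (fun v => !c.keys.contains v)).map (fun v => (v, pvN g c v))))
      (List.mem_map_of_mem hx) (by rw [hkeys]; exact hUnodup) 0]
  rw [List.filter_congr hpred]
  exact pv_filter_max g c (g.keys.filter (fun v => !c.keys.contains v))
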